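-- pv_equiv track=rewrite | github.com/malkiavec/Win4mutationdetector | streamlit_app.py | greedy_multiset_mapping
-- ===== SOURCE A (Python) =====
-- from collections import Counter
-- from typing import List, Tuple, Optional, Dict, Any
--
-- def greedy_multiset_mapping(a: Tuple[int, ...], b: Tuple[int, ...]) -> List[Tuple[int, int]]:
--     ca, cb = Counter(a), Counter(b)
--     pairs: List[Tuple[int, int]] = []
--     for d in range(10):
--         m = min(ca[d], cb[d])
--         if m:
--             pairs.extend((d, d) for _ in range(m))
--             ca[d] -= m
--             cb[d] -= m
--     rem_a, rem_b = [], []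
--     for d in range(10):
--         if ca[d] > 0: rem_a.extend([d] * ca[d])
--         if cb[d] > 0: rem_b.extend([d] * cb[d])
--     rem_a.sort()
--     rem_b.sort()
--     pairs.extend(zip(rem_a, rem_b))
--     return pairs
-- ===== SOURCE B (Python) =====
-- from collections import Counter
-- from typing import List, Tuple
--
--
-- def greedy_multiset_mapping(a: Tuple[int, ...], b: Tuple[int, ...]) -> List[Tuple[int, int]]:
--     # One pass over the digits: emit the equal pairs and collect the leftovers
--     # as run-length (digit, count) lists; then merge the two run lists directly
--     # (no remainder lists materialized, no sort, no zip).
--     ca, cb = Counter(a), Counter(b)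
--     pairs: List[Tuple[int, int]] = []
--     la: List[Tuple[int, int]] = []
--     lb: List[Tuple[int, int]] = []
--     for d in range(10):
--         m = min(ca[d], cb[d])
--         pairs.extend([(d, d)] * m)
--         if ca[d] - m > 0:
--             la.append((d, ca[d] - m))
--         if cb[d] - m > 0:
--             lb.append((d, cb[d] - m))
--     while la and lb:
--         (x, cx), (y, cy) = la[0], lb[0]
--         k = min(cx, cy)
--         pairs.extend([(x, y)] * k)
--         la = la[1:] if cx == k else [(x, cx - k)] + la[1:]
--         lb = lb[1:] if cy == k else [(y, cy - k)] + lb[1:]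
--     return pairs
-- ===== Notes on version B (the rewrite author's own statement) =====
-- stated objective: alternative
-- what changed: Phase 2 no longer materializes the two remainder lists, sorts them and zips: B collects per-digit leftover (digit,count) runs during the single digit pass and merges the two run lists directly run-by-run, emitting min(count,count) pairs at a time.
import Mathlib
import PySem

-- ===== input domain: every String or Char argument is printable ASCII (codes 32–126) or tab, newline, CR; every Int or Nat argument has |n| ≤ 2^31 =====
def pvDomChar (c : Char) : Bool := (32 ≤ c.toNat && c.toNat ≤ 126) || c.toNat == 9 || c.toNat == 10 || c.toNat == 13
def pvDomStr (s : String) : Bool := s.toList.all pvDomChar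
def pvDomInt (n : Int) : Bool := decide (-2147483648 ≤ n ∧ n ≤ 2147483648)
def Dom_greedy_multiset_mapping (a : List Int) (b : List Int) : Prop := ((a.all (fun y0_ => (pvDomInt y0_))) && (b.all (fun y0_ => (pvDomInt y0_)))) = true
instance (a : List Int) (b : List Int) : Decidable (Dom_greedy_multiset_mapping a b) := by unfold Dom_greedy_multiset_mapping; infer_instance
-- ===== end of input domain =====

-- B replaces A's materialize-remainders / sort / zip phase by a run-length merge of
-- per-digit leftover (digit, count) runs collected in the same single pass over the digits
-- (objective: alternative; both programs' return values are proved equal on all inputs).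

-- ===== PORT A =====
-- loop body of A's first loop: m = min(ca[d], cb[d]); if m: pairs += [(d,d)]*m; ca[d] -= m; cb[d] -= m
def stepA1 (st : List (Int × Int) × PySem.Dict Int Int × PySem.Dict Int Int) (d : Int) :
    List (Int × Int) × PySem.Dict Int Int × PySem.Dict Int Int :=
  let m := min (st.2.1.getD d 0) (st.2.2.getD d 0)
  if m ≠ 0 then
    (st.1 ++ List.replicate m.toNat (d, d),
     st.2.1.insert d (st.2.1.getD d 0 - m),
     st.2.2.insert d (st.2.2.getD d 0 - m))
  else st

-- loop body of A's second loop: if ca[d] > 0: rem_a += [d]*ca[d]; if cb[d] > 0: rem_b += [d]*cb[d]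
def stepA2 (ca cb : PySem.Dict Int Int) (st : List Int × List Int) (d : Int) : List Int × List Int :=
  ((if ca.getD d 0 > 0 then st.1 ++ List.replicate (ca.getD d 0).toNat d else st.1),
   (if cb.getD d 0 > 0 then st.2 ++ List.replicate (cb.getD d 0).toNat d else st.2))

def greedy_multiset_mapping (a : List Int) (b : List Int) : List (Int × Int) :=
  let ca := PySem.Dict.counter a
  let cb := PySem.Dict.counter b
  let s1 := (PySem.List.pyRange 0 10 1).foldl stepA1 ([], ca, cb)
  let s2 := (PySem.List.pyRange 0 10 1).foldl (stepA2 s1.2.1 s1.2.2) ([], [])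
  let rem_a := PySem.List.sorted s2.1 (fun x => x) false
  let rem_b := PySem.List.sorted s2.2 (fun x => x) false
  s1.1 ++ rem_a.zip rem_b

-- ===== PORT B =====
-- loop body of B's single digit pass (B never mutates the counters)
def stepB (ca cb : PySem.Dict Int Int) (st : List (Int × Int) × List (Int × Int) × List (Int × Int)) (d : Int) :
    List (Int × Int) × List (Int × Int) × List (Int × Int) :=
  let m := min (ca.getD d 0) (cb.getD d 0)
  (st.1 ++ List.replicate m.toNat (d, d),
   (if ca.getD d 0 - m > 0 then st.2.1 ++ [(d, ca.getD d 0 - m)] else st.2.1),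
   (if cb.getD d 0 - m > 0 then st.2.2 ++ [(d, cb.getD d 0 - m)] else st.2.2))

-- while la and lb: take the head runs, emit min(cx,cy) pairs, drop/shrink the heads
def mergeRuns : List (Int × Int) → List (Int × Int) → List (Int × Int)
  | (x, cx) :: la, (y, cy) :: lb =>
    let k := min cx cy
    List.replicate k.toNat (x, y) ++
      mergeRuns (if cx = k then la else (x, cx - k) :: la)
                (if cy = k then lb else (y, cy - k) :: lb)
  | _, _ => []
termination_by la lb => la.length + lb.length
decreasing_by split_ifs <;> (try simp only [List.length_cons]) <;> omega

def greedy_multiset_mapping_alt (a : List Int) (b : List Int) : List (Int × Int) :=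
  let ca := PySem.Dict.counter a
  let cb := PySem.Dict.counter b
  let s := (PySem.List.pyRange 0 10 1).foldl (stepB ca cb) ([], [], [])
  s.1 ++ mergeRuns s.2.1 s.2.2

-- ===== PRECONDITION & SPEC =====
def Spec_greedy_multiset_mapping (a : List Int) (b : List Int) (out : List (Int × Int)) : Prop := out = greedy_multiset_mapping_alt a b
instance (a : List Int) (b : List Int) (out : List (Int × Int)) : Decidable (Spec_greedy_multiset_mapping a b out) := by unfold Spec_greedy_multiset_mapping; infer_instance

-- ===== CLAIM (what is proved, stated in full; the proofs are below) =====
def Claim_equal_greedy_multiset_mapping : Prop := ∀ (a : List Int) (b : List Int), Dom_greedy_multiset_mapping a b → Spec_greedy_multiset_mapping a b (greedy_multiset_mapping a b)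

-- ===== LEMMAS AND PROOFS =====

-- min(ca[d], cb[d])
def mVal (ca cb : PySem.Dict Int Int) (d : Int) : Int := min (ca.getD d 0) (cb.getD d 0)
-- the phase-1 pairs produced for the digit list ds
def eqPairs (ca cb : PySem.Dict Int Int) (ds : List Int) : List (Int × Int) :=
  ds.flatMap (fun d => List.replicate (mVal ca cb d).toNat (d, d))
-- leftover runs on the a-side / b-side
def runsA (ca cb : PySem.Dict Int Int) (ds : List Int) : List (Int × Int) :=
  ds.flatMap (fun d => if ca.getD d 0 - mVal ca cb d > 0 then [(d, ca.getD d 0 - mVal ca cb d)] else [])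
def runsB (ca cb : PySem.Dict Int Int) (ds : List Int) : List (Int × Int) :=
  ds.flatMap (fun d => if cb.getD d 0 - mVal ca cb d > 0 then [(d, cb.getD d 0 - mVal ca cb d)] else [])
-- expansion of a run list back to the multiset list
def expandRuns (l : List (Int × Int)) : List Int := l.flatMap (fun p => List.replicate p.2.toNat p.1)

theorem foldB_eq (ca cb : PySem.Dict Int Int) (ds : List Int) :
    ∀ (p la lb : List _), ds.foldl (stepB ca cb) (p, la, lb) =
      (p ++ eqPairs ca cb ds, la ++ runsA ca cb ds, lb ++ runsB ca cb ds) := by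
  induction ds with
  | nil => intro p la lb; simp [eqPairs, runsA, runsB]
  | cons d ds ih =>
    intro p la lb
    rw [List.foldl_cons, stepB, ih]
    simp only [eqPairs, runsA, runsB, List.flatMap_cons, mVal]
    simp only [Prod.mk.injEq]
    refine ⟨by simp, ?_, ?_⟩ <;> split_ifs <;> simp

theorem foldA1_eq (ds : List Int) (hnd : ds.Nodup) :
    ∀ (p : List (Int × Int)) (ca cb : PySem.Dict Int Int),
      (ds.foldl stepA1 (p, ca, cb)).1 = p ++ eqPairs ca cb ds
      ∧ (∀ e, (ds.foldl stepA1 (p, ca, cb)).2.1.getD e 0 =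
          if e ∈ ds then ca.getD e 0 - mVal ca cb e else ca.getD e 0)
      ∧ (∀ e, (ds.foldl stepA1 (p, ca, cb)).2.2.getD e 0 =
          if e ∈ ds then cb.getD e 0 - mVal ca cb e else cb.getD e 0) := by
  revert hnd
  induction ds with
  | nil => intro _ p ca cb; simp [eqPairs]
  | cons d ds ih =>
    intro hnd p ca cb
    obtain ⟨hd, hnd'⟩ := List.nodup_cons.mp hnd
    rw [List.foldl_cons]
    simp only [stepA1]
    by_cases h : min (ca.getD d 0) (cb.getD d 0) ≠ 0
    · rw [if_pos h]
      obtain ⟨h1, h2, h3⟩ := ih hnd'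
        (p ++ List.replicate (min (ca.getD d 0) (cb.getD d 0)).toNat (d, d))
        (ca.insert d (ca.getD d 0 - min (ca.getD d 0) (cb.getD d 0)))
        (cb.insert d (cb.getD d 0 - min (ca.getD d 0) (cb.getD d 0)))
      refine ⟨?_, ?_, ?_⟩
      · rw [h1]
        have hcongr : eqPairs (ca.insert d (ca.getD d 0 - min (ca.getD d 0) (cb.getD d 0)))
            (cb.insert d (cb.getD d 0 - min (ca.getD d 0) (cb.getD d 0))) ds = eqPairs ca cb ds := by
          unfold eqPairs
          refine List.flatMap_congr (fun x hx => ?_)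
          have hxd : x ≠ d := fun hxe => hd (hxe ▸ hx)
          rw [mVal, mVal, PySem.Dict.getD_insert_of_ne _ _ _ hxd,
            PySem.Dict.getD_insert_of_ne _ _ _ hxd]
        rw [hcongr]
        simp [eqPairs, List.flatMap_cons, mVal, List.append_assoc]
      · intro e
        rw [h2 e]
        by_cases he : e = d
        · subst he
          simp only [if_neg (fun hm => hd hm : e ∈ ds → False), List.mem_cons, true_or,
            PySem.Dict.getD_insert_self]
          simp [mVal]
        · simp [mVal, PySem.Dict.getD_insert_of_ne _ _ _ he, List.mem_cons, he]
      · intro e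
        rw [h3 e]
        by_cases he : e = d
        · subst he
          simp only [if_neg (fun hm => hd hm : e ∈ ds → False), List.mem_cons, true_or,
            PySem.Dict.getD_insert_self]
          simp [mVal]
        · simp [mVal, PySem.Dict.getD_insert_of_ne _ _ _ he, List.mem_cons, he]
    · rw [if_neg h]
      rw [not_not] at h
      obtain ⟨h1, h2, h3⟩ := ih hnd' p ca cb
      refine ⟨?_, ?_, ?_⟩
      · rw [h1]
        simp [eqPairs, List.flatMap_cons, mVal, h]
      · intro e
        rw [h2 e]
        by_cases he : e = d
        · subst he
          simp [mVal, h]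
        · simp [List.mem_cons, he]
      · intro e
        rw [h3 e]
        by_cases he : e = d
        · subst he
          simp [mVal, h]
        · simp [List.mem_cons, he]

theorem foldA2_eq (ca cb : PySem.Dict Int Int) (ds : List Int) :
    ∀ (ra rb : List Int), ds.foldl (stepA2 ca cb) (ra, rb) =
      (ra ++ ds.flatMap (fun d => if ca.getD d 0 > 0 then List.replicate (ca.getD d 0).toNat d else []),
       rb ++ ds.flatMap (fun d => if cb.getD d 0 > 0 then List.replicate (cb.getD d 0).toNat d else [])) := by
  induction ds with
  | nil => intro ra rb; simp
  | cons d ds ih =>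
    intro ra rb
    rw [List.foldl_cons, stepA2, ih]
    simp only [List.flatMap_cons, Prod.mk.injEq]
    constructor <;> split_ifs <;> simp

theorem merge_eq_zip : ∀ (la lb : List (Int × Int)),
    (∀ p ∈ la, 0 < p.2) → (∀ p ∈ lb, 0 < p.2) →
    mergeRuns la lb = (expandRuns la).zip (expandRuns lb) := by
  intro la lb
  induction la, lb using mergeRuns.induct with
  | case1 x cx la y cy lb k ih =>
    intro hla hlb
    simp only [dite_eq_ite] at ih
    have hx : 0 < cx := hla (x, cx) List.mem_cons_self
    have hy : 0 < cy := hlb (y, cy) List.mem_cons_self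
    have hk : (0:Int) < min cx cy := lt_min hx hy
    rw [mergeRuns]
    simp only [expandRuns, List.flatMap_cons]
    rw [show cx.toNat = (min cx cy).toNat + (cx - min cx cy).toNat by omega,
        show cy.toNat = (min cx cy).toNat + (cy - min cx cy).toNat by omega,
        List.replicate_add, List.replicate_add, List.append_assoc, List.append_assoc,
        List.zip_append (by simp), List.zip_replicate']
    have hea : expandRuns (if cx = min cx cy then la else (x, cx - min cx cy) :: la) =
        List.replicate (cx - min cx cy).toNat x ++ expandRuns la := by
      split_ifs with hc
      · rw [show (cx - min cx cy).toNat = 0 by omega]; simp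
      · simp [expandRuns, List.flatMap_cons]
    have heb : expandRuns (if cy = min cx cy then lb else (y, cy - min cx cy) :: lb) =
        List.replicate (cy - min cx cy).toNat y ++ expandRuns lb := by
      split_ifs with hc
      · rw [show (cy - min cx cy).toNat = 0 by omega]; simp
      · simp [expandRuns, List.flatMap_cons]
    have hpa : ∀ p ∈ (if cx = min cx cy then la else (x, cx - min cx cy) :: la), (0:Int) < p.2 := by
      intro p hp
      split_ifs at hp with hc
      · exact hla p (List.mem_cons_of_mem _ hp)
      · rcases List.mem_cons.mp hp with h | h
        · subst h; simp only; omega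
        · exact hla p (List.mem_cons_of_mem _ h)
    have hpb : ∀ p ∈ (if cy = min cx cy then lb else (y, cy - min cx cy) :: lb), (0:Int) < p.2 := by
      intro p hp
      split_ifs at hp with hc
      · exact hlb p (List.mem_cons_of_mem _ hp)
      · rcases List.mem_cons.mp hp with h | h
        · subst h; simp only; omega
        · exact hlb p (List.mem_cons_of_mem _ h)
    rw [ih hpa hpb, hea, heb]; rfl
  | case2 la lb h =>
    intro _ _
    rcases la with _ | ⟨⟨x, cx⟩, la⟩
    · simp [mergeRuns, expandRuns]
    · rcases lb with _ | ⟨⟨y, cy⟩, lb⟩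
      · simp [mergeRuns, expandRuns]
      · exact absurd (h x cx la y cy lb rfl rfl) (fun f => f)

theorem expandRuns_flatMap (ds : List Int) (f : Int → List (Int × Int)) :
    expandRuns (ds.flatMap f) = ds.flatMap (fun d => expandRuns (f d)) := by
  simp [expandRuns, List.flatMap_assoc]

theorem pairwise_expand (ds : List Int) (f : Int → List (Int × Int))
    (hf : ∀ d p, p ∈ f d → p.1 = d) (hds : ds.Pairwise (· < ·)) :
    (expandRuns (ds.flatMap f)).Pairwise (· ≤ ·) := by
  have hmem : ∀ d u, u ∈ expandRuns (f d) → u = d := by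
    intro d u hu
    obtain ⟨p, hp, hu⟩ := List.mem_flatMap.mp hu
    rw [List.eq_of_mem_replicate hu]
    exact hf d p hp
  rw [expandRuns_flatMap]
  refine List.pairwise_flatMap.mpr ⟨?_, ?_⟩
  · intro d _
    refine List.pairwise_of_forall_mem_list (fun u hu v hv => ?_)
    rw [hmem d u hu, hmem d v hv]
  · refine hds.imp_of_mem (fun {d1 d2} _ _ hlt => ?_)
    intro u hu v hv
    rw [hmem d1 u hu, hmem d2 v hv]
    exact le_of_lt hlt

theorem runsA_fst (ca cb : PySem.Dict Int Int) (d : Int) (p : Int × Int)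
    (hp : p ∈ (if ca.getD d 0 - mVal ca cb d > 0 then [(d, ca.getD d 0 - mVal ca cb d)] else [])) :
    p.1 = d := by
  split_ifs at hp with h
  · rw [List.mem_singleton.mp hp]
  · exact absurd hp (List.not_mem_nil)

theorem runsB_fst (ca cb : PySem.Dict Int Int) (d : Int) (p : Int × Int)
    (hp : p ∈ (if cb.getD d 0 - mVal ca cb d > 0 then [(d, cb.getD d 0 - mVal ca cb d)] else [])) :
    p.1 = d := by
  split_ifs at hp with h
  · rw [List.mem_singleton.mp hp]
  · exact absurd hp (List.not_mem_nil)

theorem runsA_pos (ca cb : PySem.Dict Int Int) (ds : List Int) :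
    ∀ p ∈ runsA ca cb ds, 0 < p.2 := by
  intro p hp
  obtain ⟨d, _, hp⟩ := List.mem_flatMap.mp hp
  split_ifs at hp with h
  · rw [List.mem_singleton.mp hp]; exact h
  · exact absurd hp (List.not_mem_nil)

theorem runsB_pos (ca cb : PySem.Dict Int Int) (ds : List Int) :
    ∀ p ∈ runsB ca cb ds, 0 < p.2 := by
  intro p hp
  obtain ⟨d, _, hp⟩ := List.mem_flatMap.mp hp
  split_ifs at hp with h
  · rw [List.mem_singleton.mp hp]; exact h
  · exact absurd hp (List.not_mem_nil)

theorem pairwise_runsA (ca cb : PySem.Dict Int Int) (ds : List Int) (hds : ds.Pairwise (· < ·)) :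
    (expandRuns (runsA ca cb ds)).Pairwise (· ≤ ·) :=
  pairwise_expand ds _ (runsA_fst ca cb) hds

theorem pairwise_runsB (ca cb : PySem.Dict Int Int) (ds : List Int) (hds : ds.Pairwise (· < ·)) :
    (expandRuns (runsB ca cb ds)).Pairwise (· ≤ ·) :=
  pairwise_expand ds _ (runsB_fst ca cb) hds

-- ===== VERDICT (by name: the statement is the Claim_ definition above) =====
theorem greedy_multiset_mapping_spec : Claim_equal_greedy_multiset_mapping := by
  intro a b _
  show greedy_multiset_mapping a b = greedy_multiset_mapping_alt a b
  unfold greedy_multiset_mapping greedy_multiset_mapping_alt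
  dsimp only
  obtain ⟨hA1, hA2, hA3⟩ := foldA1_eq (PySem.List.pyRange 0 10 1) (by decide) []
    (PySem.Dict.counter a) (PySem.Dict.counter b)
  rw [foldB_eq, foldA2_eq, hA1]
  dsimp only
  have hRA : (PySem.List.pyRange 0 10 1).flatMap
      (fun d => if ((PySem.List.pyRange 0 10 1).foldl stepA1
          ([], PySem.Dict.counter a, PySem.Dict.counter b)).2.1.getD d 0 > 0 then
        List.replicate (((PySem.List.pyRange 0 10 1).foldl stepA1
          ([], PySem.Dict.counter a, PySem.Dict.counter b)).2.1.getD d 0).toNat d else []) =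
      expandRuns (runsA (PySem.Dict.counter a) (PySem.Dict.counter b) (PySem.List.pyRange 0 10 1)) := by
    rw [runsA, expandRuns_flatMap]
    refine List.flatMap_congr (fun d hd => ?_)
    rw [hA2 d, if_pos hd]
    split_ifs with h
    · simp [expandRuns]
    · simp [expandRuns]
  have hRB : (PySem.List.pyRange 0 10 1).flatMap
      (fun d => if ((PySem.List.pyRange 0 10 1).foldl stepA1
          ([], PySem.Dict.counter a, PySem.Dict.counter b)).2.2.getD d 0 > 0 then
        List.replicate (((PySem.List.pyRange 0 10 1).foldl stepA1
          ([], PySem.Dict.counter a, PySem.Dict.counter b)).2.2.getD d 0).toNat d else []) =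
      expandRuns (runsB (PySem.Dict.counter a) (PySem.Dict.counter b) (PySem.List.pyRange 0 10 1)) := by
    rw [runsB, expandRuns_flatMap]
    refine List.flatMap_congr (fun d hd => ?_)
    rw [hA3 d, if_pos hd]
    split_ifs with h
    · simp [expandRuns]
    · simp [expandRuns]
  rw [hRA, hRB]
  simp only [List.nil_append]
  rw [PySem.List.sorted_eq_self_of_pairwise _ _
      (pairwise_runsA _ _ _ (by decide)),
    PySem.List.sorted_eq_self_of_pairwise _ _
      (pairwise_runsB _ _ _ (by decide)),
    merge_eq_zip _ _ (runsA_pos _ _ _) (runsB_pos _ _ _)]
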